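-- pv_equiv track=rewrite | github.com/OtisLau/conuhacks | engine/locators/icon_locator.py | _detect_region_from_instruction
-- ===== SOURCE A (Python) =====
-- from typing import Optional, List, Dict, Any, Tuple
--
-- def _detect_region_from_instruction(instruction: str, target: str, img_width: int, img_height: int) -> Tuple[str, Tuple[int, int, int, int]]:
--     """
--     Detect region from instruction keywords - NO API call needed.
--
--     Returns:
--         Tuple of (region_name, (x1, y1, x2, y2) crop bounds in pixels)
--     """
--     text = f"{instruction} {target}".lower()
--     w, h = img_width, img_height
--
--     # Region bounds
--     regions = {
--         "top-right": (w // 2, 0, w, h // 2),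
--         "top-left": (0, 0, w // 2, h // 2),
--         "bottom-right": (w // 2, h // 2, w, h),
--         "bottom-left": (0, h // 2, w // 2, h),
--         "top-half": (0, 0, w, h // 2),
--         "bottom-half": (0, h // 2, w, h),
--         "left-half": (0, 0, w // 2, h),
--         "right-half": (w // 2, 0, w, h),
--     }
--
--     # Keyword -> region mapping
--     # Top-right: status icons, system tray
--     if any(kw in text for kw in ["battery", "wifi", "bluetooth", "volume", "sound", "clock", "time", "date", "status", "notification", "control center", "menu bar"]):
--         return ("top-right", regions["top-right"])
--
--     # Top-left: app menus, close/minimize buttons (macOS)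
--     if any(kw in text for kw in ["close", "minimize", "maximize", "apple menu", "file menu", "edit menu", "app menu", "red button", "traffic light"]):
--         return ("top-left", regions["top-left"])
--
--     # Left side: sidebars, navigation
--     if any(kw in text for kw in ["sidebar", "navigation", "nav", "menu", "hamburger", "drawer", "panel"]):
--         return ("left-half", regions["left-half"])
--
--     # Top: toolbars, search bars
--     if any(kw in text for kw in ["toolbar", "search", "address bar", "url", "tab"]):
--         return ("top-half", regions["top-half"])
--
--     # Bottom: docks, taskbars
--     if any(kw in text for kw in ["dock", "taskbar", "bottom"]):
--         return ("bottom-half", regions["bottom-half"])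
--
--     # Default to full if no keywords match
--     return ("full", (0, 0, w, h))
-- ===== SOURCE B (Python) =====
-- # Inverted-index re-implementation: a flat keyword->region dict plus a priority
-- # ranking; scan ALL keywords once, keep the best (lowest-rank) matching region,
-- # and compute the crop bounds arithmetically from the region name at the end.
-- _KEYWORD_REGION = {
--     "battery": "top-right", "wifi": "top-right", "bluetooth": "top-right",
--     "volume": "top-right", "sound": "top-right", "clock": "top-right",
--     "time": "top-right", "date": "top-right", "status": "top-right",
--     "notification": "top-right", "control center": "top-right", "menu bar": "top-right",
--     "close": "top-left", "minimize": "top-left", "maximize": "top-left",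
--     "apple menu": "top-left", "file menu": "top-left", "edit menu": "top-left",
--     "app menu": "top-left", "red button": "top-left", "traffic light": "top-left",
--     "sidebar": "left-half", "navigation": "left-half", "nav": "left-half",
--     "menu": "left-half", "hamburger": "left-half", "drawer": "left-half", "panel": "left-half",
--     "toolbar": "top-half", "search": "top-half", "address bar": "top-half",
--     "url": "top-half", "tab": "top-half",
--     "dock": "bottom-half", "taskbar": "bottom-half", "bottom": "bottom-half",
-- }
--
-- _PRIORITY = {"top-right": 0, "top-left": 1, "left-half": 2, "top-half": 3, "bottom-half": 4}
--
--
-- def _region_bounds(name, w, h):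
--     x1 = w // 2 if name == "top-right" else 0
--     y1 = h // 2 if name == "bottom-half" else 0
--     x2 = w // 2 if name in ("top-left", "left-half") else w
--     y2 = h // 2 if name in ("top-right", "top-left", "top-half") else h
--     return (x1, y1, x2, y2)
--
--
-- def _detect_region_from_instruction(instruction: str, target: str, img_width: int, img_height: int):
--     text = f"{instruction} {target}".lower()
--     best = None  # (rank, region_name) of the best match so far
--     for kw, region in _KEYWORD_REGION.items():
--         if kw in text:
--             r = _PRIORITY[region]
--             if best is None or r < best[0]:
--                 best = (r, region)
--     if best is None:
--         return ("full", (0, 0, img_width, img_height))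
--     name = best[1]
--     return (name, _region_bounds(name, img_width, img_height))
-- ===== Notes on version B (the rewrite author's own statement) =====
-- stated objective: alternative
-- what changed: Replaces A's five-branch if-chain over keyword groups (and its regions dict) with a flat keyword->region index scanned once while keeping the lowest-priority-rank match in an accumulator, with crop bounds computed arithmetically from the region name at the end.
import Mathlib
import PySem

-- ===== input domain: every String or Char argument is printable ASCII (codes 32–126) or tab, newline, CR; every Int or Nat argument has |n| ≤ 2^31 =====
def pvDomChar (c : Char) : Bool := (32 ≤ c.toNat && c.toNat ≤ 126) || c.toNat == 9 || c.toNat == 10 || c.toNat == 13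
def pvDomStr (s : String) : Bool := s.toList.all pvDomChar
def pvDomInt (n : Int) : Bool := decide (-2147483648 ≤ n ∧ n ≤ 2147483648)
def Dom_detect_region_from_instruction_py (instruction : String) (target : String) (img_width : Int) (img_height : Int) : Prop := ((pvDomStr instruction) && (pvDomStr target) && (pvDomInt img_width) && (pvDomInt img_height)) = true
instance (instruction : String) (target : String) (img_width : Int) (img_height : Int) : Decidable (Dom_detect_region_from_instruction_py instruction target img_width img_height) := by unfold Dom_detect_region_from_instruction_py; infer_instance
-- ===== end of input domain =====

-- B replaces A's priority if-chain over keyword groups by a flat keyword->region index scanned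
-- once with a best-rank accumulator, and computes bounds arithmetically from the name (alternative).

-- ===== PORT A =====
-- Port of A. Python: text = f"{instruction} {target}".lower(); regions dict; if-chain of
-- `any(kw in text for kw in [...])` tests in order; each branch returns the dict's literal value inline.
def detect_region_from_instruction_py (instruction : String) (target : String) (img_width : Int) (img_height : Int) : String × (Int × Int × Int × Int) :=
  let text := PySem.Chars.lower (instruction.toList ++ ' ' :: target.toList)
  let w := img_width
  let h := img_height
  if (["battery", "wifi", "bluetooth", "volume", "sound", "clock", "time", "date", "status", "notification", "control center", "menu bar"] : List String).any (fun kw => PySem.Chars.isIn kw.toList text) then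
    ("top-right", (PySem.Int.floordiv w 2, 0, w, PySem.Int.floordiv h 2))
  else if (["close", "minimize", "maximize", "apple menu", "file menu", "edit menu", "app menu", "red button", "traffic light"] : List String).any (fun kw => PySem.Chars.isIn kw.toList text) then
    ("top-left", (0, 0, PySem.Int.floordiv w 2, PySem.Int.floordiv h 2))
  else if (["sidebar", "navigation", "nav", "menu", "hamburger", "drawer", "panel"] : List String).any (fun kw => PySem.Chars.isIn kw.toList text) then
    ("left-half", (0, 0, PySem.Int.floordiv w 2, h))
  else if (["toolbar", "search", "address bar", "url", "tab"] : List String).any (fun kw => PySem.Chars.isIn kw.toList text) then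
    ("top-half", (0, 0, w, PySem.Int.floordiv h 2))
  else if (["dock", "taskbar", "bottom"] : List String).any (fun kw => PySem.Chars.isIn kw.toList text) then
    ("bottom-half", (0, PySem.Int.floordiv h 2, w, h))
  else
    ("full", (0, 0, w, h))

-- ===== PORT B =====
-- B's flat keyword -> region index (a dict in Source B; looped over in insertion order).
def pvKwRegion : List (String × String) :=
  [ ("battery", "top-right"), ("wifi", "top-right"), ("bluetooth", "top-right"),
    ("volume", "top-right"), ("sound", "top-right"), ("clock", "top-right"),
    ("time", "top-right"), ("date", "top-right"), ("status", "top-right"),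
    ("notification", "top-right"), ("control center", "top-right"), ("menu bar", "top-right"),
    ("close", "top-left"), ("minimize", "top-left"), ("maximize", "top-left"),
    ("apple menu", "top-left"), ("file menu", "top-left"), ("edit menu", "top-left"),
    ("app menu", "top-left"), ("red button", "top-left"), ("traffic light", "top-left"),
    ("sidebar", "left-half"), ("navigation", "left-half"), ("nav", "left-half"),
    ("menu", "left-half"), ("hamburger", "left-half"), ("drawer", "left-half"), ("panel", "left-half"),
    ("toolbar", "top-half"), ("search", "top-half"), ("address bar", "top-half"),
    ("url", "top-half"), ("tab", "top-half"),
    ("dock", "bottom-half"), ("taskbar", "bottom-half"), ("bottom", "bottom-half") ]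

def pvPriority : PySem.Dict String Int :=
  PySem.Dict.ofList [("top-right", 0), ("top-left", 1), ("left-half", 2), ("top-half", 3), ("bottom-half", 4)]

-- Source B's _region_bounds: bounds computed arithmetically from the region name.
def pvRegionBounds (name : String) (w h : Int) : Int × Int × Int × Int :=
  let x1 := if name = "top-right" then PySem.Int.floordiv w 2 else 0
  let y1 := if name = "bottom-half" then PySem.Int.floordiv h 2 else 0
  let x2 := if name = "top-left" ∨ name = "left-half" then PySem.Int.floordiv w 2 else w
  let y2 := if name = "top-right" ∨ name = "top-left" ∨ name = "top-half" then PySem.Int.floordiv h 2 else h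
  (x1, y1, x2, y2)

-- one iteration of Source B's loop body (getD: the region key is always present in pvPriority)
def pvStep (text : List Char) (acc : Option (Int × String)) (p : String × String) : Option (Int × String) :=
  if PySem.Chars.isIn p.1.toList text then
    let r := PySem.Dict.getD pvPriority p.2 0
    match acc with
    | none => some (r, p.2)
    | some b => if r < b.1 then some (r, p.2) else some b
  else acc

def detect_region_from_instruction_py_alt (instruction : String) (target : String) (img_width : Int) (img_height : Int) : String × (Int × Int × Int × Int) :=
  let text := PySem.Chars.lower (instruction.toList ++ ' ' :: target.toList)
  match pvKwRegion.foldl (pvStep text) none with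
  | none => ("full", (0, 0, img_width, img_height))
  | some best => (best.2, pvRegionBounds best.2 img_width img_height)

-- ===== PRECONDITION & SPEC =====
def Spec_detect_region_from_instruction_py (instruction : String) (target : String) (img_width : Int) (img_height : Int) (out : String × (Int × Int × Int × Int)) : Prop := out = detect_region_from_instruction_py_alt instruction target img_width img_height
instance (instruction : String) (target : String) (img_width : Int) (img_height : Int) (out : String × (Int × Int × Int × Int)) : Decidable (Spec_detect_region_from_instruction_py instruction target img_width img_height out) := by unfold Spec_detect_region_from_instruction_py; infer_instance

-- ===== CLAIM =====
def Claim_equal_detect_region_from_instruction_py : Prop := ∀ (instruction : String) (target : String) (img_width : Int) (img_height : Int), Dom_detect_region_from_instruction_py instruction target img_width img_height → Spec_detect_region_from_instruction_py instruction target img_width img_height (detect_region_from_instruction_py instruction target img_width img_height)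

-- ===== LEMMAS AND PROOFS =====

-- combine the accumulator with a matched region of rank r
def pvUpd (acc : Option (Int × String)) (r : Int) (region : String) : Option (Int × String) :=
  match acc with
  | none => some (r, region)
  | some b => if r < b.1 then some (r, region) else some b

lemma pvUpd_idem (acc : Option (Int × String)) (r : Int) (region : String) :
    pvUpd (pvUpd acc r region) r region = pvUpd acc r region := by
  cases acc with
  | none => simp [pvUpd]
  | some b =>
      by_cases h : r < b.1 <;> simp [pvUpd, h]

-- folding Source B's step over a block of keywords that all map to one region of rank r
lemma pvStep_group (text : List Char) (region : String) (r : Int)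
    (hr : PySem.Dict.getD pvPriority region 0 = r) (kws : List String) (acc : Option (Int × String)) :
    List.foldl (pvStep text) acc (kws.map (fun k => (k, region))) =
      if kws.any (fun k => PySem.Chars.isIn k.toList text) then pvUpd acc r region else acc := by
  induction kws generalizing acc with
  | nil => simp
  | cons k ks ih =>
      simp only [List.map_cons, List.foldl_cons, List.any_cons]
      by_cases hk : PySem.Chars.isIn k.toList text = true
      · have hstep : pvStep text acc (k, region) = pvUpd acc r region := by
          simp [pvStep, hk, hr, pvUpd]
        rw [hstep, ih]
        by_cases hks : ks.any (fun k => PySem.Chars.isIn k.toList text) = true <;>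
          simp [hk, hks, pvUpd_idem]
      · have hstep : pvStep text acc (k, region) = acc := by
          simp [pvStep, hk]
        rw [hstep, ih]
        simp [hk]


lemma hlist_eq : pvKwRegion =
    (["battery", "wifi", "bluetooth", "volume", "sound", "clock", "time", "date", "status", "notification", "control center", "menu bar"].map (fun k => (k, "top-right"))) ++
    (["close", "minimize", "maximize", "apple menu", "file menu", "edit menu", "app menu", "red button", "traffic light"].map (fun k => (k, "top-left"))) ++
    (["sidebar", "navigation", "nav", "menu", "hamburger", "drawer", "panel"].map (fun k => (k, "left-half"))) ++
    (["toolbar", "search", "address bar", "url", "tab"].map (fun k => (k, "top-half"))) ++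
    (["dock", "taskbar", "bottom"].map (fun k => (k, "bottom-half"))) := by rfl

-- ===== VERDICT =====
theorem detect_region_from_instruction_py_spec : Claim_equal_detect_region_from_instruction_py := by
  intro instruction target w h _
  unfold Spec_detect_region_from_instruction_py
  simp only [detect_region_from_instruction_py, detect_region_from_instruction_py_alt]
  generalize PySem.Chars.lower (instruction.toList ++ ' ' :: target.toList) = text
  rw [hlist_eq]
  simp only [List.foldl_append]
  rw [pvStep_group text "top-right" 0 (by rfl), pvStep_group text "top-left" 1 (by rfl),
      pvStep_group text "left-half" 2 (by rfl), pvStep_group text "top-half" 3 (by rfl),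
      pvStep_group text "bottom-half" 4 (by rfl)]
  generalize (["battery", "wifi", "bluetooth", "volume", "sound", "clock", "time", "date", "status", "notification", "control center", "menu bar"] : List String).any (fun k => PySem.Chars.isIn k.toList text) = b1
  generalize (["close", "minimize", "maximize", "apple menu", "file menu", "edit menu", "app menu", "red button", "traffic light"] : List String).any (fun k => PySem.Chars.isIn k.toList text) = b2
  generalize (["sidebar", "navigation", "nav", "menu", "hamburger", "drawer", "panel"] : List String).any (fun k => PySem.Chars.isIn k.toList text) = b3
  generalize (["toolbar", "search", "address bar", "url", "tab"] : List String).any (fun k => PySem.Chars.isIn k.toList text) = b4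
  generalize (["dock", "taskbar", "bottom"] : List String).any (fun k => PySem.Chars.isIn k.toList text) = b5
  cases b1 <;> cases b2 <;> cases b3 <;> cases b4 <;> cases b5 <;>
    simp [pvUpd, pvRegionBounds]
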